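-- pv_equiv track=rewrite | github.com/adrianbielsa1/onion | source/parity.py | get_data_carrying_bits
-- ===== SOURCE A (Python) =====
-- def get_data_carrying_bits(byte: int):
--     # Resulting bit stream.
--     result = ""
--
--     # NOTE: All bits (except the LSB) must be analyzed since leading
--     # 0 bits are also important. This cannot be achieved using
--     # built-in functions like "bin" since they discard unimportant
--     # zeros.
--     # MSB -> LSB (not included).
--     for i in range(7, 0, -1):
--         if byte & (2 ** i):
--             result += "1"
--         else:
--             result += "0"
--
--     return result
-- ===== SOURCE B (Python) =====
-- def get_data_carrying_bits(byte: int):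
--     # Bits 7..1 of the byte (MSB -> LSB, LSB dropped) as a fixed-width
--     # zero-padded binary string: shift out the LSB, mask the 7 bits, format.
--     return format((byte >> 1) & 0x7F, "07b")
-- ===== Notes on version B (the rewrite author's own statement) =====
-- stated objective: idiomatic
-- what changed: Replaces the seven-iteration loop of per-bit mask tests and string concatenation with a single closed-form expression: shift out the LSB, mask with 0x7F, and render with format(..., '07b').
import Mathlib
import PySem

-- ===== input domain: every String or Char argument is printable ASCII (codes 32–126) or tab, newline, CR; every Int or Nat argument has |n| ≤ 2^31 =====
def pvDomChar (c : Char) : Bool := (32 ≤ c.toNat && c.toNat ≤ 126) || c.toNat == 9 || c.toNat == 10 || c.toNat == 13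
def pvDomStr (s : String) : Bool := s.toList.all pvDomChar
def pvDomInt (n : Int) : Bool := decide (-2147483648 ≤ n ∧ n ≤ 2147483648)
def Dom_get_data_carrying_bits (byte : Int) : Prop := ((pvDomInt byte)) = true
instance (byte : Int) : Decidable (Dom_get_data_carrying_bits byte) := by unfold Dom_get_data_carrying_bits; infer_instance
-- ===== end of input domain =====

-- B replaces A's seven-iteration mask-and-concatenate loop by one closed-form
-- expression: format((byte >> 1) & 0x7F, '07b')  (objective: idiomatic).

-- ===== PORT A =====
-- 'for i in range(7, 0, -1): result += "1" if byte & (2 ** i) else "0"'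
-- '2 ** i' is ported as '2 ^ i.toNat': exact here since every i produced by
-- range(7, 0, -1) is positive; 'if byte & m:' is int truthiness, i.e. ≠ 0.
def get_data_carrying_bits (byte : Int) : String :=
  (PySem.List.pyRange 7 0 (-1)).foldl
    (fun result i =>
      result ++ (if PySem.Int.band byte (2 ^ i.toNat) ≠ 0 then "1" else "0"))
    ""

-- ===== PORT B =====
-- port of format(n, '07b') for 0 ≤ n < 128 (exactly the values B feeds it):
-- the 7 binary digits of n, MSB first, zero-padded.
def pvFormat07b (n : Nat) : String :=
  String.ofList (((List.range 7).reverse).map (fun j => if n.testBit j then '1' else '0'))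

def get_data_carrying_bits_alt (byte : Int) : String :=
  pvFormat07b (PySem.Int.band (byte >>> (1 : Nat)) 127).toNat

-- ===== PRECONDITION & SPEC =====
def Spec_get_data_carrying_bits (byte : Int) (out : String) : Prop := out = get_data_carrying_bits_alt byte
instance (byte : Int) (out : String) : Decidable (Spec_get_data_carrying_bits byte out) := by unfold Spec_get_data_carrying_bits; infer_instance

-- ===== CLAIM (what is proved, stated in full; the proofs are below) =====
def Claim_equal_get_data_carrying_bits : Prop := ∀ (byte : Int), Dom_get_data_carrying_bits byte → Spec_get_data_carrying_bits byte (get_data_carrying_bits byte)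

-- ===== LEMMAS AND PROOFS =====

-- Flipping all 8 low bits of m < 256 is subtraction from 255.
set_option maxRecDepth 4096 in
lemma pv_testBit_flip : ∀ m : Nat, m < 256 → ∀ i : Nat, i < 8 →
    (255 - m).testBit i = !(m.testBit i) := by decide

-- Python's '>> 1' is floor division by 2.
lemma pv_shiftRight_one (a : Int) : a >>> (1 : Nat) = a / 2 := by
  cases a with
  | ofNat m =>
      show ((↑(m >>> 1) : Int)) = ↑m / 2
      rw [Nat.shiftRight_one]
      omega
  | negSucc m =>
      show Int.negSucc (m >>> 1) = Int.negSucc m / 2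
      rw [Nat.shiftRight_one, Int.negSucc_eq, Int.negSucc_eq]
      omega

-- '& 127' keeps the 7 low bits: it is '% 128' (Python semantics, also on negatives).
lemma pv_band_127 (x : Int) : PySem.Int.band x 127 = x % 128 := by
  unfold PySem.Int.band
  by_cases h : 0 ≤ x
  · simp only [h, if_true, show (0:Int) ≤ 127 by norm_num]
    rw [show ((127 : Int)).toNat = 2 ^ 7 - 1 from rfl, Nat.and_two_pow_sub_one_eq_mod]
    omega
  · simp only [h, if_false, show (0:Int) ≤ 127 by norm_num, if_true]
    rw [show ((127 : Int)).toNat = 127 from rfl, Nat.land_comm,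
        show (127 : Nat) = 2 ^ 7 - 1 from rfl, Nat.and_two_pow_sub_one_eq_mod]
    omega

-- Masking with a single bit 2^i (i < 8) only looks at the 8 low bits of a.
lemma pv_band_pow (a : Int) (i : Nat) (hi : i < 8) :
    PySem.Int.band a (2 ^ i) = PySem.Int.band (a % 256) (2 ^ i) := by
  have hp : ((2 : Int) ^ i).toNat = 2 ^ i := by
    rw [show ((2 : Int) ^ i) = ((2 ^ i : Nat) : Int) by push_cast; ring, Int.toNat_natCast]
  have hpos : (0 : Int) ≤ 2 ^ i := by positivity
  have hm0 : (0 : Int) ≤ a % 256 := Int.emod_nonneg a (by norm_num)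
  unfold PySem.Int.band
  by_cases h : 0 ≤ a
  · simp only [h, hm0, hpos, if_true]
    have ht : (a % 256).toNat = a.toNat % 256 := by omega
    rw [ht, hp, Nat.and_two_pow, Nat.and_two_pow,
        show (256 : Nat) = 2 ^ 8 from by norm_num, Nat.testBit_mod_two_pow,
        decide_eq_true hi, Bool.true_and]
  · simp only [h, hm0, hpos, if_true, if_false]
    have hk : (a % 256).toNat = 255 - ((-a - 1).toNat % 256) := by omega
    have hk256 : (-a - 1).toNat % 256 < 256 := by omega
    rw [hk, hp, Nat.two_pow_and, Nat.and_two_pow,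
        pv_testBit_flip _ hk256 i hi,
        show ((-a - 1).toNat % 256) = (-a - 1).toNat % 2 ^ 8 from by norm_num,
        Nat.testBit_mod_two_pow, decide_eq_true hi, Bool.true_and]
    cases hb : (-a - 1).toNat.testBit i <;> simp

-- A only reads the 8 low bits of its argument.
lemma pv_A_mod (a : Int) :
    get_data_carrying_bits a = get_data_carrying_bits (a % 256) := by
  unfold get_data_carrying_bits
  rw [show PySem.List.pyRange 7 0 (-1) = [7, 6, 5, 4, 3, 2, 1] from by decide]
  simp only [List.foldl,
    show Int.toNat 7 = 7 from rfl, show Int.toNat 6 = 6 from rfl,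
    show Int.toNat 5 = 5 from rfl, show Int.toNat 4 = 4 from rfl,
    show Int.toNat 3 = 3 from rfl, show Int.toNat 2 = 2 from rfl,
    show Int.toNat 1 = 1 from rfl]
  rw [pv_band_pow a 7 (by norm_num), pv_band_pow a 6 (by norm_num),
      pv_band_pow a 5 (by norm_num), pv_band_pow a 4 (by norm_num),
      pv_band_pow a 3 (by norm_num), pv_band_pow a 2 (by norm_num),
      pv_band_pow a 1 (by norm_num)]

-- B only reads the 8 low bits of its argument.
lemma pv_B_mod (a : Int) :
    get_data_carrying_bits_alt a = get_data_carrying_bits_alt (a % 256) := by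
  have hb : PySem.Int.band (a >>> (1 : Nat)) 127
      = PySem.Int.band ((a % 256) >>> (1 : Nat)) 127 := by
    rw [pv_band_127, pv_band_127, pv_shiftRight_one, pv_shiftRight_one]
    omega
  unfold get_data_carrying_bits_alt
  rw [hb]

-- On one full period the two programs agree, case by case.
set_option maxRecDepth 8192 in
lemma pv_small : ∀ n : Nat, n < 256 →
    get_data_carrying_bits (↑n) = get_data_carrying_bits_alt (↑n) := by decide

-- ===== VERDICT (by name: the statement is the Claim_ definition above) =====
theorem get_data_carrying_bits_spec : Claim_equal_get_data_carrying_bits := by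
  intro byte _
  unfold Spec_get_data_carrying_bits
  rw [pv_A_mod, pv_B_mod]
  have h0 : 0 ≤ byte % 256 := Int.emod_nonneg byte (by norm_num)
  have h1 : byte % 256 < 256 := Int.emod_lt_of_pos byte (by norm_num)
  rw [show byte % 256 = ((byte % 256).toNat : Int) by omega]
  exact pv_small _ (by omega)
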